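-- pv_equiv track=rewrite | github.com/rodrigoneal/lead_sumaria | sumula/extract_text/extract_text.py | limpar_comissao_tecnica
-- ===== SOURCE A (Python) =====
-- def limpar_comissao_tecnica(
--     comissao: list[str], nome_mandante: str, nome_visitante: str
-- ):
--     mandante = []
--     visitante = []
--     equipe_atual = mandante
--
--     for item in comissao:
--         try:
--             cargo, nome = item.split(":")
--         except IndexError:
--             continue
--         if nome_visitante in nome:
--             nome = nome.replace(nome_visitante, "")
--             equipe_atual.append({"cargo": cargo.strip(), "nome": nome.strip()})
--             equipe_atual = visitante
--             continue
--         equipe_atual.append({"cargo": cargo.strip(), "nome": nome.strip()})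
--     return {nome_mandante: mandante, nome_visitante: visitante}
-- ===== SOURCE B (Python) =====
-- def limpar_comissao_tecnica(
--     comissao: list[str], nome_mandante: str, nome_visitante: str
-- ):
--     # One pass: build every processed entry, recording the index of the
--     # first entry whose name contains nome_visitante; then partition by slicing.
--     entries = []
--     k = None
--     for i, item in enumerate(comissao):
--         cargo, nome = item.split(":")
--         if nome_visitante in nome:
--             if k is None:
--                 k = i
--             nome = nome.replace(nome_visitante, "")
--         entries.append({"cargo": cargo.strip(), "nome": nome.strip()})
--     if k is None:
--         return {nome_mandante: entries, nome_visitante: []}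
--     return {nome_mandante: entries[: k + 1], nome_visitante: entries[k + 1 :]}
-- ===== Notes on version B (the rewrite author's own statement) =====
-- stated objective: alternative
-- what changed: Replaces A's mutable current-team pointer (appending to whichever list the pointer targets, switching after the first visitor match) with a build-all-entries-then-slice-at-the-first-match-index decomposition.
-- outside the precondition, e.g. on limpar_comissao_tecnica(['nocolon'], 'H', 'V'): A raises ValueError, B raises ValueError
import Mathlib
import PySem

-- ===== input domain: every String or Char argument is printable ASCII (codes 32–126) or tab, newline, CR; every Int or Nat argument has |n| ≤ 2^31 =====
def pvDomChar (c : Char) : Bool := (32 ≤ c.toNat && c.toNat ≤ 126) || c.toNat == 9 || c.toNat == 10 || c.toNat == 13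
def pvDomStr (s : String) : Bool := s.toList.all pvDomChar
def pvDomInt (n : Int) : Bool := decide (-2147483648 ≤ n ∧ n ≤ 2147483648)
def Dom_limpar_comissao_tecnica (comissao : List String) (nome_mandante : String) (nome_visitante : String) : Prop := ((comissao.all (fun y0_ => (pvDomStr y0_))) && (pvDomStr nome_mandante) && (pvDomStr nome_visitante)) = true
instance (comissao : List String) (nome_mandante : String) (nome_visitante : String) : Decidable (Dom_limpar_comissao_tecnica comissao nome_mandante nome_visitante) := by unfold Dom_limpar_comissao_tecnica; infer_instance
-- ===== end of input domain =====

-- B replaces A's mutable current-team pointer with build-all-entries-then-slice-at-first-match-index (alternative decomposition, same cost).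


-- ===== PORT A =====
-- A's loop: equipe_atual pointer (cur = false ↦ mandante, true ↦ visitante), switching after the
-- first item whose name contains nome_visitante. Items whose split is not exactly two parts make
-- Python A raise ValueError (excluded by Pre_); the port skips them there.
def pvGoA (nv : String) : List String → List (List (String × String)) → List (List (String × String)) → Bool → (List (List (String × String)) × List (List (String × String)))
  | [], m, v, _ => (m, v)
  | item :: rest, m, v, cur =>
    match PySem.Str.split? item ":" with
    | some [cargo, nome] =>
      if PySem.Str.isIn nv nome then
        let e := [("cargo", PySem.Str.strip cargo), ("nome", PySem.Str.strip (PySem.Str.replace nome nv ""))]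
        if cur then pvGoA nv rest m (v ++ [e]) true
        else pvGoA nv rest (m ++ [e]) v true
      else
        let e := [("cargo", PySem.Str.strip cargo), ("nome", PySem.Str.strip nome)]
        if cur then pvGoA nv rest m (v ++ [e]) cur
        else pvGoA nv rest (m ++ [e]) v cur
    | _ => pvGoA nv rest m v cur

def limpar_comissao_tecnica (comissao : List String) (nome_mandante : String) (nome_visitante : String) : List (String × List (List (String × String))) :=
  let mv := pvGoA nome_visitante comissao [] [] false
  ((PySem.Dict.empty.insert nome_mandante mv.1).insert nome_visitante mv.2).items

-- ===== PORT B =====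
-- B's single pass: parse each item into (processed entry, did its name contain nome_visitante);
-- then partition by slicing at the first match index. Bad-split items (where Python B raises,
-- excluded by Pre_) are skipped.
def pvParseB (nv : String) (item : String) : Option ((List (String × String)) × Bool) :=
  match PySem.Str.split? item ":" with
  | some [cargo, nome] =>
    if PySem.Str.isIn nv nome then
      some ([("cargo", PySem.Str.strip cargo), ("nome", PySem.Str.strip (PySem.Str.replace nome nv ""))], true)
    else
      some ([("cargo", PySem.Str.strip cargo), ("nome", PySem.Str.strip nome)], false)
  | _ => none

def limpar_comissao_tecnica_alt (comissao : List String) (nome_mandante : String) (nome_visitante : String) : List (String × List (List (String × String))) :=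
  let ps := comissao.filterMap (pvParseB nome_visitante)
  let entries := ps.map Prod.fst
  match ps.findIdx? Prod.snd with
  | none => ((PySem.Dict.empty.insert nome_mandante entries).insert nome_visitante ([] : List (List (String × String)))).items
  | some k => ((PySem.Dict.empty.insert nome_mandante (entries.take (k + 1))).insert nome_visitante (entries.drop (k + 1))).items

-- ===== PRECONDITION & SPEC =====
-- Pre_ excludes inputs with an item holding no or several ':' — there `cargo, nome = item.split(":")`
-- raises ValueError in both Pythons (A's `except IndexError` does not catch it).
def Pre_limpar_comissao_tecnica (comissao : List String) (nome_mandante : String) (nome_visitante : String) : Prop :=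
  ∀ item ∈ comissao, PySem.Str.count item ":" = 1
instance (comissao : List String) (nome_mandante : String) (nome_visitante : String) : Decidable (Pre_limpar_comissao_tecnica comissao nome_mandante nome_visitante) := by unfold Pre_limpar_comissao_tecnica; infer_instance

def pvWitness_limpar_comissao_tecnica : List String × String × String :=
  (["Tecnico: Joao", "Medico: Pedro VIS", "Fisio: Ana"], "MAN", "VIS")

def Spec_limpar_comissao_tecnica (comissao : List String) (nome_mandante : String) (nome_visitante : String) (out : List (String × List (List (String × String)))) : Prop := out = limpar_comissao_tecnica_alt comissao nome_mandante nome_visitante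
instance (comissao : List String) (nome_mandante : String) (nome_visitante : String) (out : List (String × List (List (String × String)))) : Decidable (Spec_limpar_comissao_tecnica comissao nome_mandante nome_visitante out) := by unfold Spec_limpar_comissao_tecnica; infer_instance

-- ===== CLAIM (what is proved, stated in full; the proofs are below) =====
def Claim_equal_limpar_comissao_tecnica : Prop := ∀ (comissao : List String) (nome_mandante : String) (nome_visitante : String), Dom_limpar_comissao_tecnica comissao nome_mandante nome_visitante → Pre_limpar_comissao_tecnica comissao nome_mandante nome_visitante → Spec_limpar_comissao_tecnica comissao nome_mandante nome_visitante (limpar_comissao_tecnica comissao nome_mandante nome_visitante)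

-- ===== LEMMAS AND PROOFS =====

-- The loop invariant: A's pointer-driven loop computes exactly B's slice-at-first-match partition.
theorem pvGoA_eq (nv : String) (items : List String) :
    ∀ (m v : List (List (String × String))) (cur : Bool),
    pvGoA nv items m v cur =
      (let ps := items.filterMap (pvParseB nv)
       let es := ps.map Prod.fst
       if cur then (m, v ++ es)
       else
         match ps.findIdx? Prod.snd with
         | none => (m ++ es, v)
         | some k => (m ++ es.take (k + 1), v ++ es.drop (k + 1))) := by
  induction items with
  | nil => intro m v cur; cases cur <;> simp [pvGoA]
  | cons item rest ih =>
    intro m v cur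
    cases hs : PySem.Str.split? item ":" with
    | none =>
      have hp : pvParseB nv item = none := by simp [pvParseB, hs]
      simp only [pvGoA, hs, List.filterMap_cons, hp]
      exact ih m v cur
    | some parts =>
      match parts with
      | [] =>
        have hp : pvParseB nv item = none := by simp [pvParseB, hs]
        simp only [pvGoA, hs, List.filterMap_cons, hp]
        exact ih m v cur
      | [c] =>
        have hp : pvParseB nv item = none := by simp [pvParseB, hs]
        simp only [pvGoA, hs, List.filterMap_cons, hp]
        exact ih m v cur
      | c :: n :: p :: ps' =>
        have hp : pvParseB nv item = none := by simp [pvParseB, hs]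
        simp only [pvGoA, hs, List.filterMap_cons, hp]
        exact ih m v cur
      | [cargo, nome] =>
        by_cases hin : PySem.Str.isIn nv nome = true
        · have hp : pvParseB nv item =
              some ([("cargo", PySem.Str.strip cargo), ("nome", PySem.Str.strip (PySem.Str.replace nome nv ""))], true) := by
            simp only [pvParseB, hs]
            rw [if_pos (by simpa using hin)]
          simp only [pvGoA, hs, hin, if_true, List.filterMap_cons, hp]
          cases cur with
          | true =>
            simp only [if_true]
            rw [ih]
            simp [List.append_assoc]
          | false =>
            simp only [Bool.false_eq_true, if_false]
            rw [ih]
            simp [List.findIdx?_cons]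
        · have hp : pvParseB nv item =
              some ([("cargo", PySem.Str.strip cargo), ("nome", PySem.Str.strip nome)], false) := by
            simp only [pvParseB, hs]
            rw [if_neg (by simpa using hin)]
          simp only [pvGoA, hs, hin, if_false, Bool.false_eq_true, List.filterMap_cons, hp]
          cases cur with
          | true =>
            simp only [if_true]
            rw [ih]
            simp [List.append_assoc]
          | false =>
            simp only [Bool.false_eq_true, if_false]
            rw [ih]
            simp only [List.findIdx?_cons, Bool.false_eq_true, if_false, List.map_cons]
            cases hf : List.findIdx? Prod.snd (rest.filterMap (pvParseB nv)) with
            | none => simp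
            | some k => simp [List.take_succ_cons, List.drop_succ_cons, List.append_assoc]

-- ===== VERDICT (by name: the statement is the Claim_ definition above) =====
theorem limpar_comissao_tecnica_spec : Claim_equal_limpar_comissao_tecnica := by
  intro comissao nm nv _ _
  unfold Spec_limpar_comissao_tecnica limpar_comissao_tecnica limpar_comissao_tecnica_alt
  rw [pvGoA_eq]
  cases hf : List.findIdx? Prod.snd (comissao.filterMap (pvParseB nv)) <;> simp [hf]
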